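-- pv_equiv track=rewrite | github.com/carrizoXPIO/parcial-tecnicas-programacion | ejercicio1.py | ejercicio1
-- ===== SOURCE A (Python) =====
-- def soloTieneEspaciosEnBlanco(palabra):
--     for letra in palabra:
--         if letra != " ":
--             return False
--
--     return True
--
-- def ejercicio1(palabra):
--     if len(palabra) == 0:
--         return []
--
--     if soloTieneEspaciosEnBlanco(palabra):
--         return []
--
--     palabrasRotadas = [palabra]
--
--     vueltas = len(palabra)
--     ultimaLetra = -1
--     rotaciones = []
--     for valor in range(len(palabra)):
--         rotada = palabra[ultimaLetra:] + palabra[:ultimaLetra]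
--         rotaciones.append(rotada)
--         ultimaLetra = ultimaLetra - 1
--     rotaciones = rotaciones [:: -1]
--
--     return rotaciones
-- ===== SOURCE B (Python) =====
-- def ejercicio1(palabra):
--     if all(c == " " for c in palabra):
--         return []
--     n = len(palabra)
--     doble = palabra + palabra
--     return [doble[i:i + n] for i in range(n)]
-- ===== Notes on version B (the rewrite author's own statement) =====
-- stated objective: simpler
-- what changed: B replaces A's per-step negative-index slicing with a decrementing counter plus a final list reversal by slicing a doubled string forward (doble[i:i+n] for i in range(n)), and folds A's two guards (empty, all-spaces helper) into one all() check.
import Mathlib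
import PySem

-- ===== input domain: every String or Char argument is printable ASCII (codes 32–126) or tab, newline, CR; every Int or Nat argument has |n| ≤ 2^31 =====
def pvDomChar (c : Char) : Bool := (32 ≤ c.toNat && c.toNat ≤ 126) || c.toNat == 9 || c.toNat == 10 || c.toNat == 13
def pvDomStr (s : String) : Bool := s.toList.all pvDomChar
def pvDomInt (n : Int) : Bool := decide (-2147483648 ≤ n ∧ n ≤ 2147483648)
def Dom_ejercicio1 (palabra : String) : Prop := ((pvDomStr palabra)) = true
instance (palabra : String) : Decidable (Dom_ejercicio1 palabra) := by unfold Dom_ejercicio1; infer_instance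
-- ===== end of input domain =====

-- B builds the rotations by slicing a doubled string forward instead of A's
-- decrementing negative-index slices followed by a reversal; objective: simpler.

-- ===== PORT A =====
def soloTieneEspaciosEnBlanco : List Char → Bool
  | [] => true
  | letra :: rest => if letra ≠ ' ' then false else soloTieneEspaciosEnBlanco rest

def ejercicio1 (palabra : String) : List String :=
  let cs := palabra.toList
  if cs.length = 0 then []
  else if soloTieneEspaciosEnBlanco cs then []
  else
    -- palabrasRotadas = [palabra] in A is never used afterwards
    let st := (PySem.List.pyRange 0 (cs.length : Int) 1).foldl
      (fun (st : List (List Char) × Int) _ =>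
        (st.1 ++ [PySem.List.slice cs (some st.2) none ++ PySem.List.slice cs none (some st.2)],
         st.2 - 1))
      ([], -1)
    -- rotaciones[::-1] is reverse (PySem.List.slice?_none_none_neg_one)
    (st.1.reverse).map String.ofList

-- ===== PORT B =====
def ejercicio1_alt (palabra : String) : List String :=
  let cs := palabra.toList
  if cs.all (· == ' ') then []
  else
    let doble := cs ++ cs
    (PySem.List.pyRange 0 (cs.length : Int) 1).map
      (fun i => String.ofList (PySem.List.slice doble (some i) (some (i + (cs.length : Int)))))

-- ===== PRECONDITION & SPEC =====
def Spec_ejercicio1 (palabra : String) (out : List String) : Prop := out = ejercicio1_alt palabra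
instance (palabra : String) (out : List String) : Decidable (Spec_ejercicio1 palabra out) := by unfold Spec_ejercicio1; infer_instance

-- ===== CLAIM (what is proved, stated in full; the proofs are below) =====
def Claim_equal_ejercicio1 : Prop := ∀ (palabra : String), Dom_ejercicio1 palabra → Spec_ejercicio1 palabra (ejercicio1 palabra)

-- ===== LEMMAS AND PROOFS =====

-- A's helper is exactly "every character is a space"
theorem solo_eq_all (cs : List Char) : soloTieneEspaciosEnBlanco cs = cs.all (· == ' ') := by
  induction cs with
  | nil => rfl
  | cons c rest ih =>
    simp only [soloTieneEspaciosEnBlanco, List.all_cons, ih]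
    by_cases h : c = ' ' <;> simp [h]

-- A's loop, characterised: it ignores the loop variable and emits g u, g (u-1), …
theorem loopA_char {α β : Type} (g : Int → α) (l : List β) :
    ∀ (acc : List α) (u : Int),
      l.foldl (fun (st : List α × Int) _ => (st.1 ++ [g st.2], st.2 - 1)) (acc, u)
        = (acc ++ (List.range l.length).map (fun (j : Nat) => g (u - (j : Int))), u - l.length) := by
  induction l with
  | nil => simp
  | cons x rest ih =>
    intro acc u
    simp only [List.foldl_cons, ih, List.length_cons, Prod.mk.injEq]
    refine ⟨?_, by push_cast; ring⟩
    rw [List.range_succ_eq_map]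
    simp only [List.map_cons, List.map_map, List.append_assoc, List.cons_append,
      Nat.cast_zero, sub_zero]
    have hh : (fun (j : Nat) => g (u - 1 - (j : Int)))
        = ((fun (j : Nat) => g (u - (j : Int))) ∘ Nat.succ) := by
      funext j
      simp only [Function.comp]
      congr 1
      push_cast
      ring
    rw [hh]
    simp

-- the doubled-list slice is the rotation, for i < n
theorem doble_slice (cs : List Char) (i : Nat) (h : i < cs.length) :
    ((cs ++ cs).drop i).take cs.length = cs.drop i ++ cs.take i := by
  rw [List.drop_append, List.take_append]
  have h1 : i - cs.length = 0 := by omega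
  have h2 : (cs.drop i).take cs.length = cs.drop i :=
    List.take_of_length_le (by simp)
  rw [h1, h2, List.drop_zero]
  congr 1
  simp
  omega

-- ===== VERDICT (by name: the statement is the Claim_ definition above) =====
theorem ejercicio1_spec : Claim_equal_ejercicio1 := by
  intro palabra _dom
  unfold Spec_ejercicio1 ejercicio1 ejercicio1_alt
  set cs := palabra.toList with hcs
  by_cases hall : cs.all (· == ' ')
  · simp [hall, solo_eq_all]
  · have hn : cs.length ≠ 0 := by
      intro h0
      rw [List.length_eq_zero_iff] at h0
      simp [h0] at hall
    simp only [hall, solo_eq_all, hn, Bool.false_eq_true, if_false]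
    rw [PySem.List.pyRange_one]
    simp only [sub_zero, Int.toNat_natCast]
    rw [List.foldl_map, loopA_char (fun u => PySem.List.slice cs (some u) none ++ PySem.List.slice cs none (some u)) (List.range cs.length)]
    simp only [List.length_range]
    simp only [List.nil_append, List.map_map]
    apply List.ext_getElem
    · simp
    · intro i h1 h2
      simp only [List.length_map, List.length_reverse, List.length_range] at h1 h2
      rw [List.getElem_map, List.getElem_reverse]
      simp only [List.length_map, List.length_range, List.getElem_map, List.getElem_range,
        Function.comp]
      have hk : (-1 : Int) - ↑(cs.length - 1 - i) = -(((i + 1 + (cs.length - 1 - i) - i) : Nat) : Int) := by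
        push_cast [Nat.sub_sub]
        omega
      rw [hk]
      have hkk : i + 1 + (cs.length - 1 - i) - i = cs.length - i := by omega
      rw [hkk]
      have hpos : 0 < cs.length - i := by omega
      rw [PySem.List.slice_from_neg_natCast cs (cs.length - i) hpos,
          PySem.List.slice_to_neg_natCast cs (cs.length - i) hpos]
      have hni : cs.length - (cs.length - i) = i := by omega
      rw [hni]
      have h0 : (0 : Int) + (i : Int) = ((i : Nat) : Int) := by ring
      rw [h0, PySem.List.slice_natCast_add, doble_slice cs i h2]
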